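-- pv_equiv track=rewrite | github.com/StergiosKo/RL-Taxi-Agent | train_taxi_agent_RL.py | grid_qtable_alt
-- ===== SOURCE A (Python) =====
-- def grid_qtable_alt(grid):
--     # Find the positions of 'T' (taxi), 'G' (goal)
--     taxi_position = None
--     goal_position = None
--
--     for i, row in enumerate(grid):
--         for j, cell in enumerate(row):
--             if cell == 'T':
--                 taxi_position = (i, j)
--             elif cell == 'G':
--                 goal_position = (i, j)
--
--     # Extract the 5x5 nearby cells around the taxi with out-of-bounds handling
--     nearby_cells = []
--     for i in range(taxi_position[0] - 2, taxi_position[0] + 3):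
--         row_cells = []
--         for j in range(taxi_position[1] - 2, taxi_position[1] + 3):
--             if 0 <= i < len(grid) and 0 <= j < len(grid[0]):
--                 row_cells.append(grid[i][j])
--             else:
--                 row_cells.append('-1')  # Out-of-bounds cells
--         nearby_cells.append(row_cells)
--
--     # Convert the nearby cells to a string
--     nearby_str = ''.join([''.join(row) for row in nearby_cells])
--
--     # Find the relative direction of the goal from the taxi (N, E, S, W, NE, SE, SW, NW)
--     goal_direction = ""
--     if goal_position:
--         dy = goal_position[0] - taxi_position[0]
--         dx = goal_position[1] - taxi_position[1]
--
--         if dy < 0: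
--             goal_direction += "N"
--         elif dy > 0:
--             goal_direction += "S"
--
--         if dx > 0:
--             goal_direction += "E"
--         elif dx < 0:
--             goal_direction += "W"
--
--     state_str = f"{nearby_str}_{goal_direction}"
--
--     return state_str
-- ===== SOURCE B (Python) =====
-- def grid_qtable_alt(grid):
--     # Positions found by searching a flat coordinate list from the end; the 5x5
--     # window is cut out of a pre-padded grid with plain slices, no bounds tests.
--     coords = [(i, j, c) for i, row in enumerate(grid) for j, c in enumerate(row)]
--     taxi = next(((i, j) for i, j, c in reversed(coords) if c == 'T'), None)
--     goal = next(((i, j) for i, j, c in reversed(coords) if c == 'G'), None)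
--
--     ty, tx = taxi
--     w = len(grid[0])
--     blank = ['-1'] * (w + 4)
--     padded = [blank, blank] + [['-1', '-1'] + row[:w] + ['-1', '-1'] for row in grid] + [blank, blank]
--     nearby_str = ''.join(''.join(prow[tx:tx + 5]) for prow in padded[ty:ty + 5])
--
--     goal_direction = ''
--     if goal:
--         dy = goal[0] - ty
--         dx = goal[1] - tx
--         if dy < 0:
--             goal_direction += 'N'
--         elif dy > 0:
--             goal_direction += 'S'
--         if dx > 0:
--             goal_direction += 'E'
--         elif dx < 0:
--             goal_direction += 'W'
--
--     return f'{nearby_str}_{goal_direction}'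
-- ===== Notes on version B (the rewrite author's own statement) =====
-- stated objective: alternative
-- what changed: B finds the last 'T'/'G' by building a flat (i,j,cell) coordinate list once and taking the first match of a reversed search (instead of A's stateful nested scan), and builds the 5x5 window by pre-padding the whole grid with two '-1' borders and cutting it out with plain row/column slices, eliminating A's per-cell bounds test. Pre_ excludes grids with no 'T' (A raises TypeError) and grids with a row shorter than row 0 or a 'T' beyond row 0's length, where A raises IndexError or returns a window shaped by its accidental len(grid[0]) column bound.
import Mathlib
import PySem

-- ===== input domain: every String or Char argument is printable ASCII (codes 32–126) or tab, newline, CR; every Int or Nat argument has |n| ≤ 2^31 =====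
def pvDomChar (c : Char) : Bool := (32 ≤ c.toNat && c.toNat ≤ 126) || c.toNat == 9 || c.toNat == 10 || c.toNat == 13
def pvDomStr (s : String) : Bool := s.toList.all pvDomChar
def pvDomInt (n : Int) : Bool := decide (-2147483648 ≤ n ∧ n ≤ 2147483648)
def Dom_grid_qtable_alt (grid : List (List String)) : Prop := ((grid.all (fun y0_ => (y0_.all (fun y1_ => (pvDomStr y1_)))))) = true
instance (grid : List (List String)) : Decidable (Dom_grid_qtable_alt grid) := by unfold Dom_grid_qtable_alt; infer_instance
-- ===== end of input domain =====

-- B finds the taxi/goal as the first match of a reversed flat coordinate list and cuts the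
-- 5x5 window out of a pre-padded grid with plain slices (no per-cell bounds test); same result.

-- ===== PORT A =====
-- A-side helpers
-- one cell of the scan loop: 'if cell == "T": taxi = (i, j) elif cell == "G": goal = (i, j)'
def pvStepA (i : Int) (st : Option (Int × Int) × Option (Int × Int)) (q : Int × String) :
    Option (Int × Int) × Option (Int × Int) :=
  if q.2 = "T" then (some (i, q.1), st.2)
  else if q.2 = "G" then (st.1, some (i, q.1))
  else st

-- the full scan: 'for i, row in enumerate(grid): for j, cell in enumerate(row): …'
def pvScanA (grid : List (List String)) : Option (Int × Int) × Option (Int × Int) :=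
  (PySem.List.enumerate grid 0).foldl (fun st p =>
    (PySem.List.enumerate p.2 0).foldl (pvStepA p.1) st) (none, none)

-- one window cell: 'grid[i][j] if 0 <= i < len(grid) and 0 <= j < len(grid[0]) else "-1"'
def pvCellA (grid : List (List String)) (i j : Int) : String :=
  if 0 ≤ i ∧ i < (grid.length : Int) ∧ 0 ≤ j ∧ j < ((PySem.List.pyGetD grid 0 []).length : Int)
  then PySem.List.pyGetD (PySem.List.pyGetD grid i []) j ""
  else "-1"

-- the direction code (textually identical in A and B)
def pvDir (t : Int × Int) (g? : Option (Int × Int)) : String :=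
  match g? with
  | none => ""
  | some g =>
    let dy := g.1 - t.1
    let dx := g.2 - t.2
    let g1 := if dy < 0 then "" ++ "N" else if dy > 0 then "" ++ "S" else ""
    if dx > 0 then g1 ++ "E" else if dx < 0 then g1 ++ "W" else g1

def grid_qtable_alt (grid : List (List String)) : String :=
  match (pvScanA grid).1 with
  | none => ""    -- Python raises TypeError here (taxi_position[0] on None); excluded by Pre_
  | some (ty, tx) =>
    let nearby_cells := (PySem.List.pyRange (ty - 2) (ty + 3) 1).foldl (fun acc i =>
        acc ++ [(PySem.List.pyRange (tx - 2) (tx + 3) 1).foldl (fun racc j =>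
          racc ++ [pvCellA grid i j]) []]) []
    let nearby_str := PySem.Str.join "" (nearby_cells.map (fun row => PySem.Str.join "" row))
    nearby_str ++ "_" ++ pvDir (ty, tx) (pvScanA grid).2

-- ===== PORT B =====
-- B-side helpers
-- coords = [(i, j, c) for i, row in enumerate(grid) for j, c in enumerate(row)]
def pvCoords (grid : List (List String)) : List (Int × Int × String) :=
  (PySem.List.enumerate grid 0).flatMap (fun p =>
    (PySem.List.enumerate p.2 0).map (fun q => (p.1, q.1, q.2)))

-- next(((i, j) for i, j, c in reversed(coords) if c == cell), None)
def pvFindLast (grid : List (List String)) (cell : String) : Option (Int × Int) :=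
  ((pvCoords grid).reverse.find? (fun t => t.2.2 == cell)).map (fun t => (t.1, t.2.1))

-- padded = [blank]*2 + [['-1','-1'] + row[:w] + ['-1','-1'] for row in grid] + [blank]*2
-- (row[:w] with 0 ≤ w is List.take; ['-1']*(w+4) with w+4 ≥ 0 is List.replicate — both exact here)
def pvPadded (grid : List (List String)) : List (List String) :=
  let w := (PySem.List.pyGetD grid 0 []).length
  let blank := List.replicate (w + 4) "-1"
  [blank, blank] ++ grid.map (fun row => ["-1", "-1"] ++ row.take w ++ ["-1", "-1"]) ++ [blank, blank]

def grid_qtable_alt_alt (grid : List (List String)) : String :=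
  match pvFindLast grid "T" with
  | none => ""    -- Python raises TypeError here (unpacking None); excluded by Pre_
  | some (ty, tx) =>
    let padded := pvPadded grid
    let nearby_str := PySem.Str.join ""
      ((PySem.List.slice padded (some ty) (some (ty + 5))).map (fun prow =>
        PySem.Str.join "" (PySem.List.slice prow (some tx) (some (tx + 5)))))
    nearby_str ++ "_" ++ pvDir (ty, tx) (pvFindLast grid "G")

-- ===== PRECONDITION & SPEC =====
-- Pre_ excludes grids with no 'T' cell (Python A raises TypeError) and grids with a row
-- shorter than row 0 or with a 'T' at a column beyond row 0's length: there A raises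
-- IndexError or, when the taxi window misses those cells, returns a value shaped by the
-- accidental len(grid[0]) column bound; a grid is naturally rectangular.
def Pre_grid_qtable_alt (grid : List (List String)) : Prop :=
  (∃ row ∈ grid, "T" ∈ row) ∧
  (∀ row ∈ grid, (grid.headD []).length ≤ row.length) ∧
  (∀ row ∈ grid, "T" ∉ row.drop (grid.headD []).length)
instance (grid : List (List String)) : Decidable (Pre_grid_qtable_alt grid) := by
  unfold Pre_grid_qtable_alt; infer_instance

def pvWitness_grid_qtable_alt : List (List String) := [["T", "."], [".", "G"]]

def Spec_grid_qtable_alt (grid : List (List String)) (out : String) : Prop := out = grid_qtable_alt_alt grid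
instance (grid : List (List String)) (out : String) : Decidable (Spec_grid_qtable_alt grid out) := by unfold Spec_grid_qtable_alt; infer_instance

-- ===== CLAIM (what is proved, stated in full; the proofs are below) =====
def Claim_equal_grid_qtable_alt : Prop := ∀ (grid : List (List String)), Dom_grid_qtable_alt grid → Pre_grid_qtable_alt grid → Spec_grid_qtable_alt grid (grid_qtable_alt grid)

-- ===== LEMMAS AND PROOFS =====

-- 'record the last match' component of A's scan step
def pvPick (cell : String) (o : Option (Int × Int)) (t : Int × Int × String) : Option (Int × Int) :=
  if t.2.2 = cell then some (t.1, t.2.1) else o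

-- A's nested scan is a flat fold over B's coordinate list, componentwise pvPick
lemma pvScanA_eq_flat (grid : List (List String)) :
    pvScanA grid = (pvCoords grid).foldl
      (fun st t => (pvPick "T" st.1 t, pvPick "G" st.2 t)) (none, none) := by
  unfold pvScanA pvCoords
  rw [List.foldl_flatMap]
  apply PySem.List.foldl_congr_mem
  intro st p _
  rw [List.foldl_map]
  apply PySem.List.foldl_congr_mem
  intro acc q _
  unfold pvStepA pvPick
  by_cases h1 : q.2 = "T" <;> by_cases h2 : q.2 = "G" <;> simp_all

-- a fold that keeps the last match is the first match of the reversed list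
lemma pvFoldPick (cell : String) (L : List (Int × Int × String)) (st : Option (Int × Int)) :
    L.foldl (pvPick cell) st =
      match L.reverse.find? (fun t => t.2.2 == cell) with
      | some t => some (t.1, t.2.1)
      | none => st := by
  induction L using List.reverseRecOn generalizing st with
  | nil => rfl
  | append_singleton l x ih =>
    rw [List.foldl_append, List.reverse_append]
    simp only [List.foldl_cons, List.foldl_nil, List.reverse_cons, List.reverse_nil,
      List.nil_append, List.cons_append, List.find?]
    by_cases h : x.2.2 = cell
    · simp [pvPick, h]
    · have hx : (x.2.2 == cell) = false := by simp [h]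
      simp only [pvPick, if_neg h, hx]
      exact ih st

lemma pvScan_fst (grid : List (List String)) : (pvScanA grid).1 = pvFindLast grid "T" := by
  rw [pvScanA_eq_flat, PySem.List.foldl_prod_mk (f := pvPick "T") (g := pvPick "G")]
  simp only [pvFoldPick]
  unfold pvFindLast
  rcases hf : (pvCoords grid).reverse.find? (fun t => t.2.2 == "T") with _ | t <;> simp [hf]

lemma pvScan_snd (grid : List (List String)) : (pvScanA grid).2 = pvFindLast grid "G" := by
  rw [pvScanA_eq_flat, PySem.List.foldl_prod_mk (f := pvPick "T") (g := pvPick "G")]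
  simp only [pvFoldPick]
  unfold pvFindLast
  rcases hf : (pvCoords grid).reverse.find? (fun t => t.2.2 == "G") with _ | t <;> simp [hf]

-- every position the scan stores is a genuine cell of the grid
def pvOk (grid : List (List String)) (c : String) (o : Option (Int × Int)) : Prop :=
  ∀ y x, o = some (y, x) →
    ∃ a b : Nat, y = (a : Int) ∧ x = (b : Int) ∧ a < grid.length ∧
      ∃ h : b < (grid.getD a []).length, (grid.getD a [])[b] = c

lemma pvScanA_ok (grid : List (List String)) :
    pvOk grid "T" (pvScanA grid).1 ∧ pvOk grid "G" (pvScanA grid).2 := by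
  unfold pvScanA
  refine List.foldlRecOn (motive := fun (st : Option (Int × Int) × Option (Int × Int)) => pvOk grid "T" st.1 ∧ pvOk grid "G" st.2) _ _ ?_ ?_
  · exact ⟨fun y x h => by simp at h, fun y x h => by simp at h⟩
  · intro st hst p hp
    refine List.foldlRecOn (motive := fun (st : Option (Int × Int) × Option (Int × Int)) => pvOk grid "T" st.1 ∧ pvOk grid "G" st.2) _ _ hst ?_
    intro st' hst' q hq
    obtain ⟨k, hk, rfl⟩ := (PySem.List.mem_enumerate_iff _ _ _).mp hp
    obtain ⟨m, hm, rfl⟩ := (PySem.List.mem_enumerate_iff _ _ _).mp hq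
    unfold pvStepA
    split_ifs with h1 h2
    · refine ⟨?_, hst'.2⟩
      intro y x hyx
      simp only [Option.some.injEq, Prod.mk.injEq] at hyx
      refine ⟨k, m, by omega, by omega, hk, ?_, ?_⟩
      · rw [List.getD_eq_getElem _ _ hk]; exact hm
      · simp only [List.getD_eq_getElem _ _ hk]
        exact h1
    · refine ⟨hst'.1, ?_⟩
      intro y x hyx
      simp only [Option.some.injEq, Prod.mk.injEq] at hyx
      refine ⟨k, m, by omega, by omega, hk, ?_, ?_⟩
      · rw [List.getD_eq_getElem _ _ hk]; exact hm
      · simp only [List.getD_eq_getElem _ _ hk]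
        exact h2
    · exact hst'

lemma pvHead_eq (grid : List (List String)) (hne : grid ≠ []) :
    PySem.List.pyGetD grid 0 [] = grid.headD [] := by
  cases grid with
  | nil => exact absurd rfl hne
  | cons x t =>
    rw [PySem.List.pyGetD_of_nonneg _ _ le_rfl]
    rfl

-- a map that is constantly "-1" on the range
lemma pvMapConst (f : Int → String) (a b : Int) (h : ∀ j, a ≤ j → j < b → f j = "-1") :
    (PySem.List.pyRange a b 1).map f = List.replicate (b - a).toNat "-1" := by
  have h' : ∀ j ∈ PySem.List.pyRange a b 1, f j = (fun _ => "-1") j := by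
    intro j hj
    obtain ⟨h1, h2⟩ := PySem.List.mem_pyRange_one.mp hj
    exact h j h1 h2
  rw [List.map_congr_left h', List.map_const', PySem.List.length_pyRange_one]

-- the cells of a two-element '-1' padding block
lemma pvPadCell (K : Nat) (h : K < (["-1", "-1"] : List String).length) :
    (["-1", "-1"] : List String)[K] = "-1" := by
  simp only [List.length_cons, List.length_nil] at h
  interval_cases K <;> rfl

lemma pvBlankCell (bl : List String) (K : Nat) (h : K < ([bl, bl] : List (List String)).length) :
    ([bl, bl] : List (List String))[K] = bl := by
  simp only [List.length_cons, List.length_nil] at h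
  interval_cases K <;> rfl

-- a column slice of one padded row is A's guarded 5-cell row
lemma pvRow_eq (grid : List (List String))
    (rect : ∀ row ∈ grid, (grid.headD []).length ≤ row.length)
    (n b : Nat) (hn : n < grid.length + 4)
    (hb : b < (PySem.List.pyGetD grid 0 []).length) :
    PySem.List.slice ((pvPadded grid)[n]'(by simp [pvPadded]; omega))
        (some (b : Int)) (some ((b : Int) + 5))
      = (PySem.List.pyRange ((b : Int) - 2) ((b : Int) + 3) 1).map
          (pvCellA grid ((n : Int) - 2)) := by
  have hne : grid ≠ [] := by
    intro h
    rw [h] at hb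
    simp [PySem.List.pyGetD, PySem.List.pyGet?, PySem.List.pyIdx?] at hb
  set w : Nat := (PySem.List.pyGetD grid 0 []).length with hw
  set blank : List String := List.replicate (w + 4) "-1" with hblank
  have hpad : pvPadded grid = [blank, blank] ++
      (grid.map (fun row => ["-1", "-1"] ++ row.take w ++ ["-1", "-1"]) ++ [blank, blank]) :=
    rfl
  have h5 : ((b : Int) + 5) = ((b : Int) + ((5 : Nat) : Int)) := by norm_num
  rw [h5, PySem.List.slice_natCast_add]
  simp only [hpad]
  by_cases hmid : 2 ≤ n ∧ n < grid.length + 2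
  · -- a real grid row
    obtain ⟨h2, hH⟩ := hmid
    have hlen : w ≤ (grid[n - 2]'(by omega)).length := by
      rw [hw, pvHead_eq grid hne]; exact rect _ (List.getElem_mem _)
    rw [List.getElem_append_right (by simp; omega), List.getElem_append_left (by simp; omega),
      List.getElem_map]
    have hn2 : n - ([blank, blank] : List (List String)).length = n - 2 := by simp
    simp only [hn2]
    apply List.ext_getElem
    · simp only [List.length_take, List.length_drop, List.length_append, List.length_cons,
        List.length_nil, Nat.min_eq_left hlen, PySem.List.length_pyRange_one, List.length_map]
      omega
    · intro m hm1 hm2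
      have hm5 : m < 5 := by
        have := hm1
        simp only [List.length_take, List.length_drop] at this
        omega
      rw [List.getElem_take, List.getElem_drop, List.getElem_map,
        PySem.List.getElem_pyRange_one]
      have hi0 : (0 : Int) ≤ (n : Int) - 2 := by omega
      have hiH : (n : Int) - 2 < (grid.length : Int) := by omega
      have hgi : PySem.List.pyGetD grid ((n : Int) - 2) [] = grid[n - 2]'(by omega) := by
        rw [PySem.List.pyGetD_eq_getElem _ _ hi0 hiH]
        congr 1
        omega
      by_cases hj : 2 ≤ b + m ∧ b + m < w + 2
      · -- inside the real row
        unfold pvCellA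
        rw [if_pos ⟨hi0, hiH, by omega, by push_cast [← hw]; omega⟩, hgi,
          PySem.List.pyGetD_eq_getElem _ _ (by omega) (by omega)]
        rw [List.getElem_append_left (by simp [Nat.min_eq_left hlen]; omega),
          List.getElem_append_right (by simp; omega), List.getElem_take]
        exact getElem_congr rfl (by simp; omega) (by simp; omega)
      · -- padding cell
        unfold pvCellA
        rw [if_neg (by push_cast [← hw]; omega)]
        by_cases hlt : b + m < 2
        · rw [List.getElem_append_left (by simp; omega),
            List.getElem_append_left (by simp; omega)]
          exact pvPadCell _ _
        · rw [List.getElem_append_right (by simp [Nat.min_eq_left hlen]; omega)]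
          exact pvPadCell _ _
  · -- a '-1' border row
    have hrow : ([blank, blank] ++
        (grid.map (fun row => ["-1", "-1"] ++ row.take w ++ ["-1", "-1"]) ++ [blank, blank]))[n]'(by
          simp; omega) = blank := by
      by_cases hlt : n < 2
      · rw [List.getElem_append_left (by simp; omega)]
        exact pvBlankCell _ _ _
      · rw [List.getElem_append_right (by simp; omega),
          List.getElem_append_right (by simp; omega)]
        exact pvBlankCell _ _ _
    rw [hrow, hblank, List.drop_replicate, List.take_replicate,
      pvMapConst _ _ _ (fun j h1 h2 => by
        unfold pvCellA
        exact if_neg (by omega))]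
    congr 1
    omega

-- the five padded rows around the taxi are A's five guarded rows
lemma pvRows_eq (grid : List (List String))
    (rect : ∀ row ∈ grid, (grid.headD []).length ≤ row.length)
    (a b : Nat) (ha : a < grid.length)
    (hb : b < (PySem.List.pyGetD grid 0 []).length) :
    (PySem.List.slice (pvPadded grid) (some (a : Int)) (some ((a : Int) + 5))).map
      (fun prow => PySem.List.slice prow (some (b : Int)) (some ((b : Int) + 5)))
    = (PySem.List.pyRange ((a : Int) - 2) ((a : Int) + 3) 1).map
        (fun i => (PySem.List.pyRange ((b : Int) - 2) ((b : Int) + 3) 1).map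
          (pvCellA grid i)) := by
  have h5 : ((a : Int) + 5) = ((a : Int) + ((5 : Nat) : Int)) := by norm_num
  rw [h5, PySem.List.slice_natCast_add]
  have hplen : (pvPadded grid).length = grid.length + 4 := by
    simp [pvPadded]
  apply List.ext_getElem
  · simp only [List.length_map, List.length_take, List.length_drop, hplen,
      PySem.List.length_pyRange_one]
    omega
  · intro k hk1 hk2
    have hk5 : k < 5 := by
      have := hk1
      simp only [List.length_map, List.length_take, List.length_drop] at this
      omega
    rw [List.getElem_map, List.getElem_take, List.getElem_drop, List.getElem_map,
      PySem.List.getElem_pyRange_one]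
    have := pvRow_eq grid rect (a + k) b (by omega) hb
    rw [this, show ((a + k : Nat) : Int) - 2 = (a : Int) - 2 + (k : Int) from by push_cast; omega]

-- joining joined rows is joining the flat cell list
lemma pvIntercalateNil (l : List (List Char)) : List.intercalate [] l = l.flatten := by
  induction l with
  | nil => rfl
  | cons x t ih =>
    cases t with
    | nil => simp [List.intercalate]
    | cons y t' =>
      simp only [List.intercalate, List.intersperse] at *
      simp_all [List.flatten]

lemma pvJoinFlatten (L : List (List String)) :
    PySem.Str.join "" (L.map (fun r => PySem.Str.join "" r)) = PySem.Str.join "" L.flatten := by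
  have hin : ∀ r : List String, (PySem.Str.join "" r).toList = (r.map String.toList).flatten := by
    intro r
    rw [PySem.Str.toList_join]
    show List.intercalate _ _ = _
    rw [show ("" : String).toList = [] from rfl, pvIntercalateNil]
  apply String.toList_inj.mp
  rw [hin, PySem.Str.toList_join]
  show _ = List.intercalate _ _
  rw [show ("" : String).toList = [] from rfl, pvIntercalateNil, List.map_map]
  induction L with
  | nil => rfl
  | cons x t ih =>
    simp only [List.map_cons, List.flatten_cons, List.map_append, List.flatten_append,
      Function.comp_apply, hin] at *
    rw [ih]

-- ===== VERDICT (by name: the statement is the Claim_ definition above) =====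
theorem grid_qtable_alt_spec : Claim_equal_grid_qtable_alt := by
  intro grid _ hpre
  unfold Spec_grid_qtable_alt grid_qtable_alt grid_qtable_alt_alt
  rw [← pvScan_fst, ← pvScan_snd]
  rcases hsc : (pvScanA grid).1 with _ | ⟨ty, tx⟩
  · rfl
  · -- bounds for ty, tx
    obtain ⟨a, b, hy, hx, ha, hb, hcell⟩ := (pvScanA_ok grid).1 ty tx hsc
    subst hy hx
    have hmem : grid.getD a [] ∈ grid := by
      rw [List.getD_eq_getElem _ _ ha]; exact List.getElem_mem _
    have hne : grid ≠ [] := by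
      intro h
      rw [h] at ha
      simp at ha
    have hbW : b < (grid.headD []).length := by
      by_contra hge
      refine hpre.2.2 _ hmem ?_
      rw [← hcell]
      have hd : ((grid.getD a []).drop
            (grid.headD []).length)[b - (grid.headD []).length]'(by
              rw [List.length_drop]; omega) = (grid.getD a [])[b] := by
        rw [List.getElem_drop]
        congr 1
        omega
      rw [← hd]
      exact List.getElem_mem _
    have hb' : b < (PySem.List.pyGetD grid 0 []).length := by
      rw [pvHead_eq grid hne]; exact hbW
    -- rewrite A's nested fold as a map of rows, then both joins as flat joins
    simp only [PySem.List.foldl_append_singleton_eq_map, List.nil_append]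
    rw [pvJoinFlatten]
    have hcomp : List.map
          (fun prow => PySem.Str.join "" (PySem.List.slice prow (some (b : Int)) (some ((b : Int) + 5))))
          (PySem.List.slice (pvPadded grid) (some (a : Int)) (some ((a : Int) + 5)))
        = List.map (fun r => PySem.Str.join "" r)
            ((PySem.List.slice (pvPadded grid) (some (a : Int)) (some ((a : Int) + 5))).map
              (fun prow => PySem.List.slice prow (some (b : Int)) (some ((b : Int) + 5)))) := by
      rw [List.map_map]
      rfl
    rw [hcomp, pvJoinFlatten, pvRows_eq grid hpre.2.1 a b ha hb']
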